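-- pv_equiv track=rewrite | github.com/Tompats/Frequent-Itemsets | main.py | ExactCounting
-- ===== SOURCE A (Python) =====
-- from itertools import combinations
--
-- def ExactCounting(itemBaskets):
--     hash_table = {}
--     flag = True
--     k = 1
--     while flag:
--         for key in itemBaskets:
--             #get the doubles/triples/quadraples etc. given k. I.e if k=2 we get pairs, k=3 we get triplets etc.
--             combines = combinations(itemBaskets[key],k)
--             #create an array of the values
--             array = [i for i in combines]
--             for j in array:
--                 if j in hash_table:
--                     hash_table[j] += 1
--                 else:
--                     hash_table[j] = 1
--         if k==2:
--             flag = False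
--         k+=1
--
--     return hash_table
-- ===== SOURCE B (Python) =====
-- from itertools import combinations
--
-- def ExactCounting(itemBaskets):
--     # Build the key stream in A's insertion order: all singletons, then all pairs.
--     baskets = list(itemBaskets.values())
--     stream = [t for b in baskets for t in combinations(b, 1)]
--     stream += [t for b in baskets for t in combinations(b, 2)]
--     # Count multiplicities by sorting + run-length encoding (no increment lookups).
--     counts = {}
--     run_key, run_len = None, 0
--     for key in sorted(stream):
--         if key == run_key:
--             run_len += 1
--         else:
--             if run_len:
--                 counts[run_key] = run_len
--             run_key, run_len = key, 1
--     if run_len: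
--         counts[run_key] = run_len
--     # Emit in first-occurrence order of the stream.
--     result = {}
--     for key in stream:
--         if key not in result:
--             result[key] = counts[key]
--     return result
-- ===== Notes on version B (the rewrite author's own statement) =====
-- stated objective: alternative
-- what changed: Replaces A's while/flag/k driver with hash-style dict increments by a sort-based counter: B flattens all size-1 and size-2 combinations into one key stream, sorts the stream, run-length-encodes the runs into a count table, and finally emits the stream's first occurrences with their run lengths.
import Mathlib
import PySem

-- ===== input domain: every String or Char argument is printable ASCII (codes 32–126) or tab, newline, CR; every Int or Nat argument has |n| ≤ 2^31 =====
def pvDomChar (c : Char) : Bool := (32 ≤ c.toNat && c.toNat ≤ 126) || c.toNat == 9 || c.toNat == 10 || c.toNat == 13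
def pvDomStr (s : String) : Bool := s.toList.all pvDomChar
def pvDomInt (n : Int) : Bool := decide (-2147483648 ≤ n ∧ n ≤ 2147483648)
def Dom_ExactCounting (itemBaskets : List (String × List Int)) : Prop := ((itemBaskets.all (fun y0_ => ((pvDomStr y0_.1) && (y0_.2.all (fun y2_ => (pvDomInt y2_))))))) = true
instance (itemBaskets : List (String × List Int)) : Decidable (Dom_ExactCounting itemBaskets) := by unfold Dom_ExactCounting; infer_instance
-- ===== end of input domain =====

-- B replaces A's while/flag/k driver with dict-increment counting by a sort-based counter:
-- flatten all 1- and 2-combinations into one key stream, sort it, run-length-encode the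
-- runs into a count table, and emit the stream's first occurrences with their run lengths.

-- ===== PORT A =====
-- the inner `for j in array: if j in hash_table: … else: …` loop
def pvCountPass (h : PySem.Dict (List Int) Int) (arr : List (List Int)) :
    PySem.Dict (List Int) Int :=
  arr.foldl (fun h j => if h.contains j then h.insert j (h.getD j 0 + 1) else h.insert j 1) h

-- the `for key in itemBaskets` loop for a fixed k; the input dict is decoded as an
-- association list, so iterating its items yields exactly (key, itemBaskets[key])
def pvSweep (items : List (String × List Int)) (k : Nat) (h : PySem.Dict (List Int) Int) :
    PySem.Dict (List Int) Int :=
  items.foldl (fun h kv => pvCountPass h (PySem.List.combinations kv.2 k)) h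

-- the while loop; the fuel argument only makes it total (3 suffices: body runs for k = 1, 2)
def pvWhileA (items : List (String × List Int)) :
    Nat → Bool → Nat → PySem.Dict (List Int) Int → PySem.Dict (List Int) Int
  | 0, _, _, h => h
  | fuel + 1, flag, k, h =>
    if flag then
      pvWhileA items fuel (if k == 2 then false else true) (k + 1) (pvSweep items k h)
    else h

def ExactCounting (itemBaskets : List (String × List Int)) : List (List Int × Int) :=
  (pvWhileA (PySem.Dict.ofList itemBaskets).items 3 true 1 PySem.Dict.empty).items

-- ===== PORT B =====
-- the two list comprehensions building `stream`: all 1-tuples, then all 2-tuples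
def pvStream (itemBaskets : List (String × List Int)) : List (List Int) :=
  ((PySem.Dict.ofList itemBaskets).values.flatMap (fun b => PySem.List.combinations b 1)) ++
  ((PySem.Dict.ofList itemBaskets).values.flatMap (fun b => PySem.List.combinations b 2))

-- sorted(stream): Python compares int tuples lexicographically (a strict prefix is smaller),
-- which is exactly Mathlib's linear order on List Int; the instances are pinned so the
-- order lemmas about PySem.List.sorted apply
def pvSortKeys (xs : List (List Int)) : List (List Int) :=
  @PySem.List.sorted (List Int) (List Int) LinearOrder.toPartialOrder.toPreorder.toLT
    LinearOrder.toDecidableLT xs (fun x => x) false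

-- one iteration of the run-length loop; state = (counts, run_key, run_len).
-- run_key = none models run_key is None: `key == None` is False, and run_len is 0 there
-- (its initial value), so the `if run_len:` insert does nothing — hence no insert.
def pvRleStep (st : PySem.Dict (List Int) Int × Option (List Int) × Int) (key : List Int) :
    PySem.Dict (List Int) Int × Option (List Int) × Int :=
  match st with
  | (c, some rk, rn) =>
      if key == rk then (c, some rk, rn + 1)
      else (if rn ≠ 0 then c.insert rk rn else c, some key, 1)
  | (c, none, _) => (c, some key, 1)

-- the trailing `if run_len: counts[run_key] = run_len`
def pvFlush (st : PySem.Dict (List Int) Int × Option (List Int) × Int) :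
    PySem.Dict (List Int) Int :=
  match st with
  | (c, some rk, rn) => if rn ≠ 0 then c.insert rk rn else c
  | (c, none, _) => c

def pvCounts (stream : List (List Int)) : PySem.Dict (List Int) Int :=
  pvFlush ((pvSortKeys stream).foldl pvRleStep (PySem.Dict.empty, none, 0))

-- final loop: `if key not in result: result[key] = counts[key]`. `counts[key]` is ported as
-- (get? key).getD 0: every stream key is a key of counts (proved below), so Python never
-- raises KeyError here and the getD-0 branch is unreachable.
def ExactCounting_alt (itemBaskets : List (String × List Int)) : List (List Int × Int) :=
  let stream := pvStream itemBaskets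
  let counts := pvCounts stream
  (stream.foldl
    (fun r key => if r.contains key then r else r.insert key ((counts.get? key).getD 0))
    PySem.Dict.empty).items

-- ===== PRECONDITION & SPEC =====
def Spec_ExactCounting (itemBaskets : List (String × List Int)) (out : List (List Int × Int)) : Prop := out = ExactCounting_alt itemBaskets
instance (itemBaskets : List (String × List Int)) (out : List (List Int × Int)) : Decidable (Spec_ExactCounting itemBaskets out) := by unfold Spec_ExactCounting; infer_instance

-- ===== CLAIM =====
def Claim_equal_ExactCounting : Prop := ∀ (itemBaskets : List (String × List Int)), Dom_ExactCounting itemBaskets → Spec_ExactCounting itemBaskets (ExactCounting itemBaskets)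

-- ===== LEMMAS AND PROOFS =====

-- the counting update both sides reduce to
def pvUpd (d : PySem.Dict (List Int) Int) (x : List Int) : PySem.Dict (List Int) Int :=
  d.insert x (d.getD x 0 + 1)

-- A's if/else counting body is exactly pvUpd (absent key ⇒ getD = 0, so insert 1)
theorem pvCountPass_eq_foldl (h : PySem.Dict (List Int) Int) (arr : List (List Int)) :
    pvCountPass h arr = arr.foldl pvUpd h := by
  unfold pvCountPass
  have hf : (fun (h : PySem.Dict (List Int) Int) (j : List Int) =>
      if h.contains j then h.insert j (h.getD j 0 + 1) else h.insert j 1) = pvUpd := by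
    funext h j
    by_cases hc : h.contains j = true
    · simp [hc, pvUpd]
    · simp [hc, pvUpd,
        PySem.Dict.getD_of_not_contains h (0 : Int) (by simpa using hc)]
  rw [hf]

-- a fold of per-basket folds is a fold over the flattened key list
theorem pvFoldFlat (f : (String × List Int) → List (List Int))
    (L : List (String × List Int)) (h : PySem.Dict (List Int) Int) :
    L.foldl (fun h kv => (f kv).foldl pvUpd h) h = (L.flatMap f).foldl pvUpd h := by
  induction L generalizing h with
  | nil => rfl
  | cons kv L ih => simp [List.flatMap_cons, List.foldl_append, ih]

-- first occurrences of a list that are not yet in `seen`, in order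
def fio (seen : List (List Int)) : List (List Int) → List (List Int)
  | [] => []
  | k :: ks => if seen.contains k then fio seen ks else k :: fio (seen ++ [k]) ks

theorem fio_spec (js : List (List Int)) : ∀ seen : List (List Int),
    PySem.Set.update seen js = seen ++ fio seen js := by
  induction js with
  | nil => intro seen; simp [fio, PySem.Set.update_nil]
  | cons k ks ih =>
      intro seen
      rw [PySem.Set.update_cons]
      by_cases h : k ∈ seen
      · have hc : seen.contains k = true := by simpa using h
        rw [PySem.Set.add_of_mem h, ih seen]
        simp [fio, h]
      · have hc : seen.contains k = false := by simpa using h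
        rw [PySem.Set.add_of_not_mem h, ih (seen ++ [k])]
        simp [fio, h]

theorem fio_ofList (js : List (List Int)) : fio [] js = PySem.Set.ofList js := by
  have h := fio_spec js []
  rw [PySem.Set.update_nil_left] at h
  simpa using h.symm

-- the first-occurrence emission loop of B appends (key, g key) per new key, in order
theorem reorder_items (g : List Int → Int) (js : List (List Int)) :
    ∀ d : PySem.Dict (List Int) Int,
    (js.foldl (fun r key => if r.contains key then r else r.insert key (g key)) d).items
      = d.items ++ (fio d.keys js).map (fun k => (k, g k)) := by
  induction js with
  | nil => intro d; simp [fio]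
  | cons k ks ih =>
      intro d
      rw [List.foldl_cons]
      by_cases h : d.contains k = true
      · have hk : k ∈ d.keys := (PySem.Dict.contains_iff_mem_keys d k).mp h
        have hkc : d.keys.contains k = true := by simpa using hk
        simp only [h, if_true, ih d, fio, hkc]
      · have hf : d.contains k = false := by simpa using h
        have hk : ¬ k ∈ d.keys := fun hm => by
          simp [(PySem.Dict.contains_iff_mem_keys d k).mpr hm] at hf
        have hkc : d.keys.contains k = false := by simpa using hk
        simp only [hf, Bool.false_eq_true, if_false, ih (d.insert k (g k)),
          PySem.Dict.items_insert_of_not_contains d (g k) hf,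
          PySem.Dict.keys_insert_of_not_contains d (g k) hf]
        simp [fio, hk, List.append_assoc]

-- run-length encoding over a ≤-sorted tail: the flushed table maps every key to its
-- multiplicity (the open run (rk, rn) still to be closed, everything else already final)
theorem rle_aux (l : List (List Int)) :
    ∀ (d : PySem.Dict (List Int) Int) (rk : List Int) (rn : Int),
    l.Pairwise (fun a b => a ≤ b) → (∀ x ∈ l, rk ≤ x) → 0 < rn →
    ∀ k : List Int, (pvFlush (l.foldl pvRleStep (d, some rk, rn))).get? k =
      if k = rk then some (rn + (l.count rk : Int))
      else if k ∈ l then some ((l.count k : Int))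
      else d.get? k := by
  induction l with
  | nil =>
      intro d rk rn _ _ hrn k
      have hne : rn ≠ 0 := ne_of_gt hrn
      simp [pvFlush, hne, PySem.Dict.get?_insert]
  | cons x xs ih =>
      intro d rk rn hpw hle hrn k
      rw [List.foldl_cons]
      by_cases hx : x = rk
      · subst hx
        have hstep : pvRleStep (d, some x, rn) x = (d, some x, rn + 1) := by
          simp [pvRleStep]
        rw [hstep, ih d x (rn + 1) hpw.of_cons
          (fun y hy => hle y (List.mem_cons_of_mem _ hy)) (by omega) k]
        by_cases hk : k = x
        · subst hk
          rw [if_pos rfl, if_pos rfl, List.count_cons_self]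
          exact congrArg some (by push_cast; ring)
        · have hcnt : List.count k (x :: xs) = List.count k xs :=
            List.count_cons_of_ne (fun h => hk h.symm)
          by_cases hm : k ∈ xs
          · have hmm : k ∈ x :: xs := List.mem_cons_of_mem _ hm
            simp [hk, hm, hmm, hcnt]
          · have hnm : ¬ k ∈ x :: xs := by
              intro hh
              rcases List.mem_cons.mp hh with hh | hh
              · exact hk hh
              · exact hm hh
            simp [hk, hm, hnm]
      · have hbeq : (x == rk) = false := by simpa using hx
        have hne : rn ≠ 0 := ne_of_gt hrn
        have hstep : pvRleStep (d, some rk, rn) x = (d.insert rk rn, some x, 1) := by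
          simp [pvRleStep, hbeq, hne]
        rw [hstep, ih (d.insert rk rn) x 1 hpw.of_cons
          (fun y hy => List.rel_of_pairwise_cons hpw hy) one_pos k]
        -- rk cannot reappear in xs: rk ≤ x and x ≤ rk would force x = rk
        have hrknotin : ¬ rk ∈ xs := fun hm =>
          hx (le_antisymm (List.rel_of_pairwise_cons hpw hm) (hle x List.mem_cons_self))
        by_cases hk : k = rk
        · subst hk
          have hkx : ¬ k = x := fun h => hx h.symm
          have hnm : ¬ k ∈ x :: xs := by
            intro hh
            rcases List.mem_cons.mp hh with hh | hh
            · exact hkx hh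
            · exact hrknotin hh
          have hcnt : List.count k (x :: xs) = 0 := List.count_eq_zero.mpr hnm
          simp [hkx, hrknotin, hcnt, PySem.Dict.get?_insert_self]
        · by_cases hkx : k = x
          · subst hkx
            rw [if_pos rfl, if_neg hk, if_pos List.mem_cons_self, List.count_cons_self]
            exact congrArg some (by push_cast; ring)
          · have hcnt : List.count k (x :: xs) = List.count k xs :=
              List.count_cons_of_ne (fun h => hkx h.symm)
            by_cases hm : k ∈ xs
            · have hmm : k ∈ x :: xs := List.mem_cons_of_mem _ hm
              simp [hk, hkx, hm, hmm, hcnt]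
            · have hnm : ¬ k ∈ x :: xs := by
                intro hh
                rcases List.mem_cons.mp hh with hh | hh
                · exact hkx hh
                · exact hm hh
              simp [hk, hkx, hm, hnm, PySem.Dict.get?_insert_of_ne d rn hk]

-- every key of the stream is in the count table, with its multiplicity in the stream
theorem counts_get (stream : List (List Int)) :
    ∀ k ∈ stream, (pvCounts stream).get? k = some ((stream.count k : Int)) := by
  intro k hk
  have hperm : (pvSortKeys stream).Perm stream :=
    @PySem.List.sorted_perm (List Int) (List Int) _ LinearOrder.toDecidableLT stream
      (fun x => x) false
  have hmem : k ∈ pvSortKeys stream := hperm.mem_iff.mpr hk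
  have hcount : (pvSortKeys stream).count k = stream.count k := hperm.count_eq k
  have hpw : (pvSortKeys stream).Pairwise (fun a b => a ≤ b) :=
    PySem.List.sorted_pairwise stream (fun x => x)
  unfold pvCounts
  rcases hs : pvSortKeys stream with _ | ⟨y, ys⟩
  · rw [hs] at hmem; cases hmem
  · rw [hs] at hmem hcount hpw
    have hstep : pvRleStep (PySem.Dict.empty, none, 0) y = (PySem.Dict.empty, some y, 1) := by
      simp [pvRleStep]
    rw [List.foldl_cons, hstep]
    rw [rle_aux ys PySem.Dict.empty y 1 hpw.of_cons
      (fun x hx => List.rel_of_pairwise_cons hpw hx) one_pos k, ← hcount]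
    by_cases hky : k = y
    · subst hky
      rw [if_pos rfl, List.count_cons_self]
      exact congrArg some (by push_cast; ring)
    · rcases List.mem_cons.mp hmem with h | h
      · exact absurd h hky
      · have hcnt : List.count k (y :: ys) = List.count k ys :=
          List.count_cons_of_ne (fun hh => hky hh.symm)
        simp [hky, h, hcnt]

-- ===== VERDICT =====
theorem ExactCounting_spec : Claim_equal_ExactCounting := by
  intro itemBaskets _
  unfold Spec_ExactCounting ExactCounting ExactCounting_alt
  set L := (PySem.Dict.ofList itemBaskets).items with hL
  -- unroll A's while loop: sweep k = 1, then sweep k = 2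
  have hA : pvWhileA L 3 true 1 PySem.Dict.empty = pvSweep L 2 (pvSweep L 1 PySem.Dict.empty) := by
    simp [pvWhileA]
  have hsweep : ∀ (k : Nat) (h : PySem.Dict (List Int) Int),
      pvSweep L k h = (L.flatMap (fun kv => PySem.List.combinations kv.2 k)).foldl pvUpd h := by
    intro k h
    unfold pvSweep
    simp only [pvCountPass_eq_foldl]
    exact pvFoldFlat _ L h
  -- A's dict is the Counter of the concatenated key stream
  have hstream : pvStream itemBaskets
      = L.flatMap (fun kv => PySem.List.combinations kv.2 1)
        ++ L.flatMap (fun kv => PySem.List.combinations kv.2 2) := by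
    unfold pvStream
    simp only [PySem.Dict.values, ← hL, List.flatMap_map]
  set stream := pvStream itemBaskets with hsdef
  have hAcnt : pvWhileA L 3 true 1 PySem.Dict.empty = PySem.Dict.counter stream := by
    rw [hA, hsweep 1, hsweep 2, ← List.foldl_append, ← hstream]
    have hupd : pvUpd = fun (d : PySem.Dict (List Int) Int) (x : List Int) =>
        d.insert x (d.getD x 0 + 1) := rfl
    rw [hupd, PySem.Dict.foldl_insert_getD_add_one_eq_counter]
  rw [hAcnt, PySem.Dict.items_counter]
  -- B's emission loop writes (k, counts[k]) at each first occurrence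
  rw [reorder_items (fun key => ((pvCounts stream).get? key).getD 0) stream PySem.Dict.empty]
  have hkeys : (PySem.Dict.empty : PySem.Dict (List Int) Int).keys = ([] : List (List Int)) := rfl
  rw [hkeys, fio_ofList]
  have hitems : (PySem.Dict.empty : PySem.Dict (List Int) Int).items = ([] : List (List Int × Int)) := rfl
  rw [hitems, List.nil_append]
  apply List.map_congr_left
  intro k hk
  have hks : k ∈ stream := (PySem.Set.mem_ofList _ _).mp hk
  rw [counts_get stream k hks]
  rfl
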